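-- pv_equiv track=rewrite | github.com/Dumonoo/tbo-project | project/customers/models.py | contains_malicious_content
-- ===== SOURCE A (Python) =====
-- def contains_malicious_content(value):
--     """
--     Checks for XSS-like patterns in the input.
--     """
--     xss_patterns = [
--         "<script>",
--         "</script>",
--         "javascript:",
--         "onerror=",
--         "onclick=",
--         "<iframe>",
--     ]
--     value_lower = value.lower()
--     return any(pattern in value_lower for pattern in xss_patterns)
-- ===== SOURCE B (Python) =====
-- XSS_PATTERNS = (
--     "<script>",
--     "</script>",
--     "javascript:",
--     "onerror=",
--     "onclick=",
--     "<iframe>",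
-- )
--
--
-- def contains_malicious_content(value):
--     """Single left-to-right scan: at each position, test whether any of the
--     six fixed patterns starts there."""
--     v = value.lower()
--     for i in range(len(v)):
--         for p in XSS_PATTERNS:
--             if v.startswith(p, i):
--                 return True
--     return False
-- ===== Notes on version B (the rewrite author's own statement) =====
-- stated objective: alternative
-- what changed: Replaces six independent whole-string membership searches, one per pattern, with a single left-to-right scan over the lowered string that tests at each position whether any of the six fixed patterns starts there.
import Mathlib
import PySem

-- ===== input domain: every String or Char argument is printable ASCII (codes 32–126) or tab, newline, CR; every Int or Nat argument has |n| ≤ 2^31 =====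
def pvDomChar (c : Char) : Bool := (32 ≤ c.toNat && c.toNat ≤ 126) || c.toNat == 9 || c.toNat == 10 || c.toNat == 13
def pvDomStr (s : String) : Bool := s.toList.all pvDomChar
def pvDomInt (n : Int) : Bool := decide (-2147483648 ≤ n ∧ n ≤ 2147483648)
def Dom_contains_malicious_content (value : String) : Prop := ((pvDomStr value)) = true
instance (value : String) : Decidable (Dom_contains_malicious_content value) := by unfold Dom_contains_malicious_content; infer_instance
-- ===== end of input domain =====

-- B replaces A's six independent substring searches by one left-to-right scan
-- over the lowered string testing each position against the six patterns (objective: alternative).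


-- ===== PORT A =====
def contains_malicious_content (value : String) : Bool :=
  let xss_patterns : List String :=
    ["<script>", "</script>", "javascript:", "onerror=", "onclick=", "<iframe>"]
  let value_lower := PySem.Str.lower value
  xss_patterns.any (fun pattern => PySem.Str.isIn pattern value_lower)

-- ===== PORT B =====
-- module-level XSS_PATTERNS tuple of Source B (as char lists)
def pvXssPatterns : List (List Char) :=
  ["<script>".toList, "</script>".toList, "javascript:".toList,
   "onerror=".toList, "onclick=".toList, "<iframe>".toList]

-- the position loop of Source B: v.startswith(p, i) is p.isPrefixOf (drop i); recursing on the
-- suffix walks i = 0 .. len v - 1 exactly as the range loop does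
def pvScan : List Char → Bool
  | [] => false
  | c :: rest => pvXssPatterns.any (fun p => p.isPrefixOf (c :: rest)) || pvScan rest

def contains_malicious_content_alt (value : String) : Bool :=
  pvScan (PySem.Str.lower value).toList

-- ===== PRECONDITION & SPEC =====
def Spec_contains_malicious_content (value : String) (out : Bool) : Prop := out = contains_malicious_content_alt value
instance (value : String) (out : Bool) : Decidable (Spec_contains_malicious_content value out) := by unfold Spec_contains_malicious_content; infer_instance

-- ===== CLAIM (what is proved, stated in full; the proofs are below) =====
def Claim_equal_contains_malicious_content : Prop := ∀ (value : String), Dom_contains_malicious_content value → Spec_contains_malicious_content value (contains_malicious_content value)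

-- ===== LEMMAS AND PROOFS =====

lemma pvIsIn_cons (p : List Char) (c : Char) (rest : List Char) :
    PySem.Chars.isIn p (c :: rest) = (p.isPrefixOf (c :: rest) || PySem.Chars.isIn p rest) := by
  rw [Bool.eq_iff_iff]
  simp only [Bool.or_eq_true, PySem.Chars.isIn_iff_infix,
    List.infix_cons_iff, List.isPrefixOf_iff_prefix]

lemma pvAny_or {α : Type} (l : List α) (f g : α → Bool) :
    (l.any fun x => f x || g x) = (l.any f || l.any g) := by
  induction l with
  | nil => rfl
  | cons x xs ih =>
    simp only [List.any_cons, ih, Bool.or_assoc, Bool.or_left_comm]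

lemma pvScan_eq (l : List Char) :
    pvScan l = pvXssPatterns.any (fun p => PySem.Chars.isIn p l) := by
  induction l with
  | nil => decide
  | cons c rest ih =>
    simp only [pvScan, ih, pvIsIn_cons, pvAny_or]

-- ===== VERDICT (by name: the statement is the Claim_ definition above) =====
theorem contains_malicious_content_spec : Claim_equal_contains_malicious_content := by
  intro value _
  unfold Spec_contains_malicious_content contains_malicious_content contains_malicious_content_alt
  rw [pvScan_eq]
  simp [pvXssPatterns, PySem.Str.isIn]
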